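-- pv_equiv track=rewrite | github.com/serrebidev/BlindRSS | core/translation.py | _iter_text_chunks
-- ===== SOURCE A (Python) =====
-- from typing import Iterable, List
--
-- _DEFAULT_CHUNK_CHARS = 3500
--
-- def _iter_text_chunks(text: str, max_chars: int = _DEFAULT_CHUNK_CHARS) -> Iterable[str]:
--     """Split text into translation-friendly chunks while preserving order."""
--     s = str(text or "")
--     if not s:
--         return []
--
--     try:
--         max_chars = max(200, int(max_chars or _DEFAULT_CHUNK_CHARS))
--     except Exception:
--         max_chars = _DEFAULT_CHUNK_CHARS
--
--     if len(s) <= max_chars: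
--         return [s]
--
--     chunks: List[str] = []
--     start = 0
--     n = len(s)
--     while start < n:
--         end = min(n, start + max_chars)
--         if end < n:
--             # Prefer paragraph/newline boundaries for better translation continuity.
--             split_at = s.rfind("\n\n", start, end)
--             if split_at == -1:
--                 split_at = s.rfind("\n", start, end)
--             if split_at == -1:
--                 split_at = s.rfind(" ", start, end)
--             if split_at != -1 and split_at > start + 200:
--                 end = split_at
--         chunk = s[start:end]
--         if chunk:
--             chunks.append(chunk)
--         if end <= start:
--             end = min(n, start + max_chars)
--             if end <= start:
--                 break
--         start = end
--     return chunks
-- ===== SOURCE B (Python) =====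
-- from bisect import bisect_right
-- from typing import Iterable, List
--
-- _DEFAULT_CHUNK_CHARS = 3500
--
-- def _iter_text_chunks(text: str, max_chars: int = _DEFAULT_CHUNK_CHARS) -> Iterable[str]:
--     """Boundary-aware chunking: one pass collects all boundary positions,
--     then each window picks its split point by binary search (bisect)."""
--     s = str(text or "")
--     if not s:
--         return []
--     try:
--         max_chars = max(200, int(max_chars or _DEFAULT_CHUNK_CHARS))
--     except Exception:
--         max_chars = _DEFAULT_CHUNK_CHARS
--     n = len(s)
--     if n <= max_chars:
--         return [s]
--
--     # Single pass: sorted start indices of every "\n\n", "\n" and " ".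
--     para: List[int] = []
--     nl: List[int] = []
--     sp: List[int] = []
--     for i, ch in enumerate(s):
--         if ch == '\n':
--             nl.append(i)
--             if i + 1 < n and s[i + 1] == '\n':
--                 para.append(i)
--         elif ch == ' ':
--             sp.append(i)
--
--     def last_in(positions: List[int], lo: int, hi: int) -> int:
--         """Rightmost p in positions with lo <= p <= hi, else -1."""
--         j = bisect_right(positions, hi)
--         if j > 0 and positions[j - 1] >= lo:
--             return positions[j - 1]
--         return -1
--
--     chunks: List[str] = []
--     start = 0
--     while start < n:
--         end = min(n, start + max_chars)
--         if end < n: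
--             split_at = last_in(para, start, end - 2)
--             if split_at == -1:
--                 split_at = last_in(nl, start, end - 1)
--             if split_at == -1:
--                 split_at = last_in(sp, start, end - 1)
--             if split_at != -1 and split_at > start + 200:
--                 end = split_at
--         chunks.append(s[start:end])
--         start = end
--     return chunks
-- ===== Notes on version B (the rewrite author's own statement) =====
-- stated objective: alternative
-- what changed: Replaces A's three backward rfind scans per window by one forward pass that collects sorted lists of all '\n\n', '\n' and ' ' start indices, then picks each window's split point by binary search (bisect_right).
import Mathlib
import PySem

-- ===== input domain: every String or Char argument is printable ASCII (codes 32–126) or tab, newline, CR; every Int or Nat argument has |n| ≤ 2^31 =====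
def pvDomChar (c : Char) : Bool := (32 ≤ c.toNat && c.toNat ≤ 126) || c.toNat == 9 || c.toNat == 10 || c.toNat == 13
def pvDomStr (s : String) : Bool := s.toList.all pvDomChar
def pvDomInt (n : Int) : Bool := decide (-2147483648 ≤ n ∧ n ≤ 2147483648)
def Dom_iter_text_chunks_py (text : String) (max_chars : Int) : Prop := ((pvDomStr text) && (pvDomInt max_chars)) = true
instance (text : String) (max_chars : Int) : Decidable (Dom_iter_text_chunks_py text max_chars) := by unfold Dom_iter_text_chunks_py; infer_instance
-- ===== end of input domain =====

-- B replaces A's per-window backward rfind scans by one forward boundary-index pass plus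
-- a bisect (binary search) per window; equal return value proved for every input (alternative decomposition).

-- ===== PORT A =====
-- the while-loop of A; fuel bounds the iteration count (start strictly increases, so s.length+1 suffices)
def pvLoopA (s : List Char) (m n : Int) : Nat → Int → List String → List String
  | 0, _, acc => acc
  | fuel+1, start, acc =>
    if start < n then
      let e0 := min n (start + m)
      let e :=
        if e0 < n then
          let sa := PySem.Chars.rfindFrom s ['\n','\n'] start (some e0)
          let sa := if sa = -1 then PySem.Chars.rfindFrom s ['\n'] start (some e0) else sa
          let sa := if sa = -1 then PySem.Chars.rfindFrom s [' '] start (some e0) else sa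
          if sa ≠ -1 ∧ start + 200 < sa then sa else e0
        else e0
      let chunk := PySem.Chars.slice s (some start) (some e)
      let acc' := if chunk ≠ [] then String.ofList chunk :: acc else acc
      if e ≤ start then
        let e2 := min n (start + m)
        if e2 ≤ start then acc'
        else pvLoopA s m n fuel e2 acc'
      else pvLoopA s m n fuel e acc'
    else acc

def iter_text_chunks_py (text : String) (max_chars : Int) : List String :=
  let s := text.toList
  if s = [] then []
  else
    -- int(max_chars) on an int never raises, so the try/except body reduces to this max
    let m := max 200 (if max_chars = 0 then 3500 else max_chars)
    let n : Int := s.length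
    if n ≤ m then [String.ofList s]
    else (pvLoopA s m n (s.length + 1) 0 []).reverse

-- ===== PORT B =====
-- single forward pass: sorted start indices of every "\n\n", "\n" and " " (base index i)
def pvScanGo : List Char → Int → List Int × List Int × List Int
  | [], _ => ([], [], [])
  | c :: rest, i =>
    let r := pvScanGo rest (i + 1)
    if c = '\n' then
      ((if rest.head? = some '\n' then i :: r.1 else r.1), i :: r.2.1, r.2.2)
    else if c = ' ' then (r.1, r.2.1, i :: r.2.2)
    else r

-- rightmost p in the sorted list xs with lo ≤ p ≤ hi, else -1 (Source B's last_in, via bisect_right)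
def pvLastIn (xs : List Int) (lo hi : Int) : Int :=
  let j := PySem.List.bisectRight xs hi
  if j = 0 then -1
  else
    let p := xs.getD (j - 1) 0
    if lo ≤ p then p else -1

def pvLoopB (s : List Char) (m n : Int) (para nl sp : List Int) : Nat → Int → List String
  | 0, _ => []
  | fuel+1, start =>
    if start < n then
      let e0 := min n (start + m)
      let e :=
        if e0 < n then
          let sa := pvLastIn para start (e0 - 2)
          let sa := if sa = -1 then pvLastIn nl start (e0 - 1) else sa
          let sa := if sa = -1 then pvLastIn sp start (e0 - 1) else sa
          if sa ≠ -1 ∧ start + 200 < sa then sa else e0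
        else e0
      String.ofList (PySem.Chars.slice s (some start) (some e)) :: pvLoopB s m n para nl sp fuel e
    else []

def iter_text_chunks_py_alt (text : String) (max_chars : Int) : List String :=
  let s := text.toList
  if s = [] then []
  else
    let m := max 200 (if max_chars = 0 then 3500 else max_chars)
    let n : Int := s.length
    if n ≤ m then [String.ofList s]
    else
      let t := pvScanGo s 0
      pvLoopB s m n t.1 t.2.1 t.2.2 (s.length + 1) 0

-- ===== PRECONDITION & SPEC =====
def Spec_iter_text_chunks_py (text : String) (max_chars : Int) (out : List String) : Prop := out = iter_text_chunks_py_alt text max_chars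
instance (text : String) (max_chars : Int) (out : List String) : Decidable (Spec_iter_text_chunks_py text max_chars out) := by unfold Spec_iter_text_chunks_py; infer_instance

-- ===== CLAIM (what is proved, stated in full; the proofs are below) =====
def Claim_equal_iter_text_chunks_py : Prop := ∀ (text : String) (max_chars : Int), Dom_iter_text_chunks_py text max_chars → Spec_iter_text_chunks_py text max_chars (iter_text_chunks_py text max_chars)

-- ===== LEMMAS AND PROOFS =====

def pvIsRes (s pat : List Char) (lo hi r : Int) : Prop :=
  (r = -1 ∧ ∀ p : Nat, lo ≤ (p:Int) → (p:Int) ≤ hi → ¬ pat.IsPrefix (s.drop p)) ∨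
  (∃ p : Nat, r = (p:Int) ∧ lo ≤ (p:Int) ∧ (p:Int) ≤ hi ∧ pat.IsPrefix (s.drop p) ∧
    ∀ q : Nat, (p:Int) < (q:Int) → (q:Int) ≤ hi → ¬ pat.IsPrefix (s.drop q))

theorem pvIsRes_unique {s pat : List Char} {lo hi r1 r2 : Int}
    (h1 : pvIsRes s pat lo hi r1) (h2 : pvIsRes s pat lo hi r2) : r1 = r2 := by
  rcases h1 with ⟨e1, n1⟩ | ⟨p1, e1, lo1, hi1, pr1, mx1⟩ <;>
    rcases h2 with ⟨e2, n2⟩ | ⟨p2, e2, lo2, hi2, pr2, mx2⟩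
  · omega
  · exact absurd pr2 (n1 p2 lo2 hi2)
  · exact absurd pr1 (n2 p1 lo1 hi1)
  · rcases lt_trichotomy p1 p2 with h | h | h
    · exact absurd pr2 (mx1 p2 (by exact_mod_cast h) hi2)
    · omega
    · exact absurd pr1 (mx2 p1 (by exact_mod_cast h) hi1)

theorem pvRfind_go_spec (w pat : List Char) (k : Nat) :
    (PySem.Chars.rfind.go w pat k = -1 ∧ ∀ j : Nat, j ≤ k → ¬ pat.IsPrefix (w.drop j)) ∨
    (∃ j : Nat, j ≤ k ∧ PySem.Chars.rfind.go w pat k = (j:Int) ∧ pat.IsPrefix (w.drop j) ∧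
      ∀ j' : Nat, j < j' → j' ≤ k → ¬ pat.IsPrefix (w.drop j')) := by
  induction k with
  | zero =>
    by_cases h : pat.isPrefixOf w
    · right; exact ⟨0, le_refl _, by simp [PySem.Chars.rfind.go, h],
        by simpa using List.isPrefixOf_iff_prefix.mp h, by omega⟩
    · left
      refine ⟨by simp [PySem.Chars.rfind.go, h], ?_⟩
      intro j hj; interval_cases j
      simpa using fun hp => h (List.isPrefixOf_iff_prefix.mpr hp)
  | succ k ih =>
    have hgo : PySem.Chars.rfind.go w pat (k+1)
        = if pat.isPrefixOf (w.drop (k+1)) then ((k:Int)+1) else PySem.Chars.rfind.go w pat k := rfl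
    by_cases h : pat.isPrefixOf (w.drop (k+1))
    · right
      exact ⟨k+1, le_refl _, by simp [hgo, h], List.isPrefixOf_iff_prefix.mp h,
        fun j' h1 h2 => by omega⟩
    · rw [hgo, if_neg h]
      have hnot : ¬ pat.IsPrefix (w.drop (k+1)) := fun hp => h (List.isPrefixOf_iff_prefix.mpr hp)
      rcases ih with ⟨e, n⟩ | ⟨j, hj, e, pr, mx⟩
      · left
        refine ⟨e, fun j hj => ?_⟩
        rcases Nat.lt_succ_iff_lt_or_eq.mp (Nat.lt_succ_of_le hj) with h' | h'
        · exact n j (by omega)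
        · subst h'; exact hnot
      · right
        refine ⟨j, by omega, e, pr, fun j' h1 h2 => ?_⟩
        rcases Nat.eq_or_lt_of_le h2 with h' | h'
        · subst h'; exact hnot
        · exact mx j' h1 (by omega)

theorem pvRfindFrom_isRes (s pat : List Char) (hp : pat ≠ []) (a b : Int)
    (ha : 0 ≤ a) (hab : a ≤ b) (hbn : b ≤ (s.length:Int)) :
    pvIsRes s pat a (b - pat.length) (PySem.Chars.rfindFrom s pat a (some b)) := by
  have hplen : 1 ≤ pat.length := List.length_pos_iff.mpr hp
  have hA : ((a.toNat : Int)) = a := Int.toNat_of_nonneg ha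
  have hB : ((b.toNat : Int)) = b := Int.toNat_of_nonneg (le_trans ha hab)
  set w := List.drop a.toNat (List.take b.toNat s) with hw
  have hwlen : w.length = b.toNat - a.toNat := by
    simp [hw, List.length_drop, List.length_take]
    omega
  have bridge : ∀ j : Nat, (pat.IsPrefix (w.drop j) ↔
      pat.IsPrefix (s.drop (a.toNat + j)) ∧ a.toNat + j + pat.length ≤ b.toNat) := by
    intro j
    rw [hw, List.drop_drop, List.drop_take, List.prefix_take_iff]
    constructor
    · rintro ⟨h1, h2⟩; exact ⟨by simpa [Nat.add_comm] using h1, by omega⟩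
    · rintro ⟨h1, h2⟩; exact ⟨by simpa [Nat.add_comm] using h1, by omega⟩
  have hres : PySem.Chars.rfindFrom s pat a (some b)
      = (if PySem.Chars.rfind w pat = -1 then -1 else a + PySem.Chars.rfind w pat) := by
    unfold PySem.Chars.rfindFrom
    simp only
    rw [if_neg (show ¬ (s.length:Int) < b by omega), if_neg (show ¬ b < 0 by omega),
        if_neg (show ¬ a < 0 by omega), if_neg (show ¬ b < a by omega)]
  have hgo : PySem.Chars.rfind w pat = PySem.Chars.rfind.go w pat w.length := rfl
  rcases pvRfind_go_spec w pat w.length with ⟨e, n⟩ | ⟨j, hj, e, pr, mx⟩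
  · rw [hres, hgo, e, if_pos rfl]
    left
    refine ⟨rfl, fun p hlo hhi hpre => ?_⟩
    have hple : a.toNat ≤ p := by omega
    have := (bridge (p - a.toNat)).mpr ⟨by rwa [Nat.add_sub_cancel' hple], by omega⟩
    exact n (p - a.toNat) (by omega) this
  · have hj0 : (0:Int) ≤ (j:Int) := by positivity
    rw [hres, hgo, e, if_neg (by omega)]
    right
    obtain ⟨h1, h2⟩ := (bridge j).mp pr
    refine ⟨a.toNat + j, by push_cast; omega, by push_cast; omega, by push_cast; omega, h1,
      fun q hq1 hq2 hpre => ?_⟩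
    have hql : a.toNat + j < q := by omega
    have := (bridge (q - a.toNat)).mpr ⟨by rwa [Nat.add_sub_cancel' (by omega)], by omega⟩
    exact mx (q - a.toNat) (by omega) (by omega) this

theorem pvLastIn_isRes (s pat : List Char) (xs : List Int)
    (hmem : ∀ p : Int, p ∈ xs ↔ ∃ j : Nat, p = (j:Int) ∧ pat.IsPrefix (s.drop j))
    (hsort : xs.Pairwise (· ≤ ·)) (lo hi : Int) :
    pvIsRes s pat lo hi (pvLastIn xs lo hi) := by
  obtain ⟨hble, hlt, hgt⟩ := PySem.List.bisectRight_spec xs hi hsort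
  set J := PySem.List.bisectRight xs hi with hJ
  have hsorted : ∀ (i j : Nat) (hi' : i < xs.length) (hj' : j < xs.length), i ≤ j → xs[i] ≤ xs[j] := by
    intro i j hi' hj' hij
    rcases Nat.eq_or_lt_of_le hij with h | h
    · subst h; rfl
    · exact List.pairwise_iff_getElem.mp hsort i j hi' hj' h
  -- key: every occurrence p with p ≤ hi is at an index < J
  have hidx : ∀ q : Nat, (q:Int) ≤ hi → pat.IsPrefix (s.drop q) →
      ∃ idx : Nat, ∃ h : idx < xs.length, xs[idx] = (q:Int) ∧ idx < J := by
    intro q hq hpre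
    have : (q:Int) ∈ xs := (hmem _).mpr ⟨q, rfl, hpre⟩
    obtain ⟨idx, hidx, hval⟩ := List.mem_iff_getElem.mp this
    refine ⟨idx, hidx, hval, ?_⟩
    by_contra hge
    have := hgt idx hidx (by omega)
    omega
  unfold pvLastIn
  by_cases hJ0 : J = 0
  · rw [← hJ, if_pos hJ0]
    left
    refine ⟨rfl, fun p hlo hhi hpre => ?_⟩
    obtain ⟨idx, h, hval, hlt'⟩ := hidx p hhi hpre
    omega
  · rw [← hJ, if_neg hJ0]
    have hJ1 : J - 1 < xs.length := by omega
    have hcand : xs.getD (J - 1) 0 = xs[J-1] := List.getD_eq_getElem xs 0 hJ1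
    have hchi : xs[J-1] ≤ hi := hlt (J-1) hJ1 (by omega)
    obtain ⟨jc, hjc, hjpre⟩ := (hmem xs[J-1]).mp (List.getElem_mem hJ1)
    by_cases hge : lo ≤ xs.getD (J - 1) 0
    · rw [if_pos hge]
      right
      refine ⟨jc, by rw [hcand, hjc], by rw [hcand, hjc] at hge; exact hge, by omega, hjpre,
        fun q hq1 hq2 hpre => ?_⟩
      obtain ⟨idx, h, hval, hlt'⟩ := hidx q hq2 hpre
      have := hsorted idx (J-1) h hJ1 (by omega)
      omega
    · rw [if_neg hge]
      left
      refine ⟨rfl, fun p hlo hhi hpre => ?_⟩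
      obtain ⟨idx, h, hval, hlt'⟩ := hidx p hhi hpre
      have := hsorted idx (J-1) h hJ1 (by omega)
      rw [hcand] at hge
      omega

theorem pvHead_prefix (rest : List Char) (c : Char) : [c] <+: rest ↔ rest.head? = some c := by
  cases rest with
  | nil => simp
  | cons a l => simp [List.cons_prefix_cons, eq_comm]

theorem pvScanGo_spec (t : List Char) (i0 : Int) :
    ((∀ p : Int, p ∈ (pvScanGo t i0).1 ↔ ∃ j : Nat, p = i0 + (j:Int) ∧ ['\n','\n'].IsPrefix (t.drop j)) ∧ (pvScanGo t i0).1.Pairwise (· < ·)) ∧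
    ((∀ p : Int, p ∈ (pvScanGo t i0).2.1 ↔ ∃ j : Nat, p = i0 + (j:Int) ∧ ['\n'].IsPrefix (t.drop j)) ∧ (pvScanGo t i0).2.1.Pairwise (· < ·)) ∧
    ((∀ p : Int, p ∈ (pvScanGo t i0).2.2 ↔ ∃ j : Nat, p = i0 + (j:Int) ∧ [' '].IsPrefix (t.drop j)) ∧ (pvScanGo t i0).2.2.Pairwise (· < ·)) := by
  induction t generalizing i0 with
  | nil => simp [pvScanGo]
  | cons c rest ih =>
    obtain ⟨⟨m1, s1⟩, ⟨m2, s2⟩, ⟨m3, s3⟩⟩ := ih (i0 + 1)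
    have hA : ∀ (pat : List Char) (L : List Int),
        (∀ p : Int, p ∈ L ↔ ∃ j : Nat, p = (i0+1) + (j:Int) ∧ pat.IsPrefix (rest.drop j)) →
        L.Pairwise (· < ·) → pat.IsPrefix (c :: rest) →
        (∀ p : Int, p ∈ (i0 :: L) ↔ ∃ j : Nat, p = i0 + (j:Int) ∧ pat.IsPrefix ((c :: rest).drop j)) ∧
          (i0 :: L).Pairwise (· < ·) := by
      intro pat L hL hs hpre
      constructor
      · intro p
        constructor
        · intro hp
          rcases List.mem_cons.mp hp with h | h
          · exact ⟨0, by omega, by simpa using hpre⟩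
          · obtain ⟨j, hj, hjp⟩ := (hL p).mp h
            exact ⟨j + 1, by push_cast; omega, by simpa using hjp⟩
        · rintro ⟨j, hj, hjp⟩
          cases j with
          | zero => exact List.mem_cons.mpr (Or.inl (by omega))
          | succ j' =>
            refine List.mem_cons.mpr (Or.inr ((hL p).mpr ⟨j', by omega, ?_⟩))
            simpa using hjp
      · refine List.pairwise_cons.mpr ⟨fun p hp => ?_, hs⟩
        obtain ⟨j, hj, _⟩ := (hL p).mp hp
        omega
    have hB : ∀ (pat : List Char) (L : List Int),
        (∀ p : Int, p ∈ L ↔ ∃ j : Nat, p = (i0+1) + (j:Int) ∧ pat.IsPrefix (rest.drop j)) →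
        ¬ pat.IsPrefix (c :: rest) →
        (∀ p : Int, p ∈ L ↔ ∃ j : Nat, p = i0 + (j:Int) ∧ pat.IsPrefix ((c :: rest).drop j)) := by
      intro pat L hL hnpre p
      constructor
      · intro hp
        obtain ⟨j, hj, hjp⟩ := (hL p).mp hp
        exact ⟨j + 1, by omega, by simpa using hjp⟩
      · rintro ⟨j, hj, hjp⟩
        cases j with
        | zero => exact absurd (by simpa using hjp) hnpre
        | succ j' => exact (hL p).mpr ⟨j', by omega, by simpa using hjp⟩
    have pref2 : ['\n','\n'].IsPrefix (c :: rest) ↔ (c = '\n' ∧ rest.head? = some '\n') := by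
      rw [List.cons_prefix_cons, pvHead_prefix]
      exact and_congr_left' eq_comm
    have pref1 : ['\n'].IsPrefix (c :: rest) ↔ c = '\n' := by
      simp [List.cons_prefix_cons, eq_comm]
    have prefS : [' '].IsPrefix (c :: rest) ↔ c = ' ' := by
      simp [List.cons_prefix_cons, eq_comm]
    by_cases hc : c = '\n'
    · by_cases hh : rest.head? = some '\n'
      · simp only [pvScanGo, if_pos hc, if_pos hh]
        exact ⟨hA _ _ m1 s1 (pref2.mpr ⟨hc, hh⟩), hA _ _ m2 s2 (pref1.mpr hc), ⟨hB _ _ m3 (fun h => by simp [prefS.mp h] at hc), s3⟩⟩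
      · simp only [pvScanGo, if_pos hc, if_neg hh]
        exact ⟨⟨hB _ _ m1 (fun h => hh (pref2.mp h).2), s1⟩, hA _ _ m2 s2 (pref1.mpr hc), ⟨hB _ _ m3 (fun h => by simp [prefS.mp h] at hc), s3⟩⟩
    · by_cases hsp : c = ' '
      · simp only [pvScanGo, if_neg hc, if_pos hsp]
        exact ⟨⟨hB _ _ m1 (fun h => hc (pref2.mp h).1), s1⟩, ⟨hB _ _ m2 (fun h => hc (pref1.mp h)), s2⟩, hA _ _ m3 s3 (prefS.mpr hsp)⟩
      · simp only [pvScanGo, if_neg hc, if_neg hsp]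
        exact ⟨⟨hB _ _ m1 (fun h => hc (pref2.mp h).1), s1⟩, ⟨hB _ _ m2 (fun h => hc (pref1.mp h)), s2⟩, ⟨hB _ _ m3 (fun h => hsp (prefS.mp h)), s3⟩⟩

theorem pvSlice_ne_nil (s : List Char) (a b : Int) (ha : 0 ≤ a) (hab : a < b)
    (han : a < (s.length:Int)) : PySem.Chars.slice s (some a) (some b) ≠ [] := by
  rw [PySem.Chars.slice_eq_listSlice, ← List.length_pos_iff, PySem.List.length_slice]
  have h1 : PySem.List.clampIdx s.length a = a.toNat := by
    simp [PySem.List.clampIdx, if_neg (show ¬ a < 0 by omega)]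
    omega
  have h2 : a.toNat < PySem.List.clampIdx s.length b := by
    simp [PySem.List.clampIdx, if_neg (show ¬ b < 0 by omega)]
    omega
  omega

theorem pvIsRes_bound {s pat : List Char} {lo hi r : Int} (h : pvIsRes s pat lo hi r) :
    r = -1 ∨ (lo ≤ r ∧ r ≤ hi) := by
  rcases h with ⟨e, _⟩ | ⟨p, e, l, hh, _, _⟩
  · exact Or.inl e
  · right; omega

theorem pvLoop_eq (s : List Char) (m : Int) (para nl sp : List Int) (hm : 200 ≤ m)
    (hpara : ∀ p : Int, p ∈ para ↔ ∃ j : Nat, p = (j:Int) ∧ ['\n','\n'].IsPrefix (s.drop j))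
    (hnl : ∀ p : Int, p ∈ nl ↔ ∃ j : Nat, p = (j:Int) ∧ ['\n'].IsPrefix (s.drop j))
    (hsp : ∀ p : Int, p ∈ sp ↔ ∃ j : Nat, p = (j:Int) ∧ [' '].IsPrefix (s.drop j))
    (hps : para.Pairwise (· ≤ ·)) (hns : nl.Pairwise (· ≤ ·)) (hss : sp.Pairwise (· ≤ ·)) :
    ∀ (fuel : Nat) (start : Int) (acc : List String), 0 ≤ start →
      (pvLoopA s m (s.length:Int) fuel start acc).reverse
        = acc.reverse ++ pvLoopB s m (s.length:Int) para nl sp fuel start := by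
  intro fuel
  induction fuel with
  | zero => intro start acc h; simp [pvLoopA, pvLoopB]
  | succ fuel ih =>
    intro start acc hstart
    by_cases hlt : start < (s.length:Int)
    · have he0lt : start < min (s.length:Int) (start + m) := by omega
      have he0le : min (s.length:Int) (start + m) ≤ (s.length:Int) := by omega
      -- the three split candidates agree between A and B
      have w2 : PySem.Chars.rfindFrom s ['\n','\n'] start (some (min (s.length:Int) (start + m)))
          = pvLastIn para start (min (s.length:Int) (start + m) - 2) := by
        have hA := pvRfindFrom_isRes s ['\n','\n'] (by simp) start _ hstart (le_of_lt he0lt) he0le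
        norm_num at hA
        exact pvIsRes_unique hA (pvLastIn_isRes s ['\n','\n'] para hpara hps start _)
      have w1 : PySem.Chars.rfindFrom s ['\n'] start (some (min (s.length:Int) (start + m)))
          = pvLastIn nl start (min (s.length:Int) (start + m) - 1) := by
        have hA := pvRfindFrom_isRes s ['\n'] (by simp) start _ hstart (le_of_lt he0lt) he0le
        norm_num at hA
        exact pvIsRes_unique hA (pvLastIn_isRes s ['\n'] nl hnl hns start _)
      have w0 : PySem.Chars.rfindFrom s [' '] start (some (min (s.length:Int) (start + m)))
          = pvLastIn sp start (min (s.length:Int) (start + m) - 1) := by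
        have hA := pvRfindFrom_isRes s [' '] (by simp) start _ hstart (le_of_lt he0lt) he0le
        norm_num at hA
        exact pvIsRes_unique hA (pvLastIn_isRes s [' '] sp hsp hss start _)
      -- the split point both sides compute, with its bounds
      have hEdef : ∀ e0 : Int, start < e0 → e0 ≤ (s.length:Int) →
          let sa := pvLastIn para start (e0 - 2)
          let sa := if sa = -1 then pvLastIn nl start (e0 - 1) else sa
          let sa := if sa = -1 then pvLastIn sp start (e0 - 1) else sa
          start < (if sa ≠ -1 ∧ start + 200 < sa then sa else e0) ∧
            (if sa ≠ -1 ∧ start + 200 < sa then sa else e0) ≤ (s.length:Int) := by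
        intro e0 h1 h2
        have b2 := pvIsRes_bound (pvLastIn_isRes s ['\n','\n'] para hpara hps start (e0 - 2))
        have b1 := pvIsRes_bound (pvLastIn_isRes s ['\n'] nl hnl hns start (e0 - 1))
        have b0 := pvIsRes_bound (pvLastIn_isRes s [' '] sp hsp hss start (e0 - 1))
        simp only
        set x2 := pvLastIn para start (e0 - 2) with hx2
        set x1 := pvLastIn nl start (e0 - 1) with hx1
        set x0 := pvLastIn sp start (e0 - 1) with hx0
        split_ifs <;> omega
      simp only [pvLoopA, pvLoopB, if_pos hlt, w2, w1, w0]
      by_cases hio : min (s.length:Int) (start + m) < (s.length:Int)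
      · rw [if_pos hio]
        obtain ⟨hE1, hE2⟩ := hEdef (min (s.length:Int) (start + m)) he0lt he0le
        set x2 := pvLastIn para start (min (s.length:Int) (start + m) - 2) with hx2
        set x1 := pvLastIn nl start (min (s.length:Int) (start + m) - 1) with hx1
        set x0 := pvLastIn sp start (min (s.length:Int) (start + m) - 1) with hx0
        set c1 := if x2 = -1 then x1 else x2 with hc1
        set c0 := if c1 = -1 then x0 else c1 with hc0
        set E := if c0 ≠ -1 ∧ start + 200 < c0 then c0 else min (s.length:Int) (start + m) with hEE
        rw [if_pos (pvSlice_ne_nil s start E hstart hE1 hlt), if_neg (show ¬ E ≤ start by omega)]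
        rw [ih E (String.ofList (PySem.Chars.slice s (some start) (some E)) :: acc) (by omega)]
        simp
      · rw [if_neg hio]
        have hE1 : start < min (s.length:Int) (start + m) := he0lt
        rw [if_pos (pvSlice_ne_nil s start _ hstart hE1 hlt),
            if_neg (show ¬ min (s.length:Int) (start + m) ≤ start by omega)]
        rw [ih _ (String.ofList (PySem.Chars.slice s (some start) (some (min (s.length:Int) (start + m)))) :: acc) (by omega)]
        simp
    · simp [pvLoopA, pvLoopB, hlt]

-- ===== VERDICT (by name: the statement is the Claim_ definition above) =====
theorem iter_text_chunks_py_spec : Claim_equal_iter_text_chunks_py := by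
  intro text max_chars _
  unfold Spec_iter_text_chunks_py iter_text_chunks_py iter_text_chunks_py_alt
  by_cases hnil : text.toList = []
  · simp [hnil]
  · simp only [if_neg hnil]
    by_cases hsmall : ((text.toList.length:Int)) ≤ max 200 (if max_chars = 0 then 3500 else max_chars)
    · rw [if_pos hsmall, if_pos hsmall]
    · rw [if_neg hsmall, if_neg hsmall]
      obtain ⟨⟨m1, s1⟩, ⟨m2, s2⟩, ⟨m3, s3⟩⟩ := pvScanGo_spec text.toList 0
      have hz : ∀ (P : Nat → Prop) (p : Int), (∃ j : Nat, p = 0 + (j:Int) ∧ P j) ↔ (∃ j : Nat, p = (j:Int) ∧ P j) := by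
        intro P p
        constructor <;> rintro ⟨j, h1, h2⟩ <;> exact ⟨j, by omega, h2⟩
      have := pvLoop_eq text.toList (max 200 (if max_chars = 0 then 3500 else max_chars))
        (pvScanGo text.toList 0).1 (pvScanGo text.toList 0).2.1 (pvScanGo text.toList 0).2.2
        (le_max_left _ _)
        (fun p => (m1 p).trans (hz _ p)) (fun p => (m2 p).trans (hz _ p)) (fun p => (m3 p).trans (hz _ p))
        (s1.imp le_of_lt) (s2.imp le_of_lt) (s3.imp le_of_lt)
        (text.toList.length + 1) 0 [] (le_refl 0)
      simpa using this
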